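-- pv_equiv track=rewrite | github.com/Pack3tL0ss/central-api-cli | centralcli/clitree/batch/batch.py | _extract_uplink_commands
-- ===== SOURCE A (Python) =====
-- def _extract_uplink_commands(commands: list[str]) -> tuple[list[str], list[str]]:  # pragma: no cover
--     _start=None
--     uplk_cmds = []
--     for idx, c in enumerate(commands):
--         if c.lower().startswith("uplink wired"):
--             _start = idx
--         elif _start and c.lstrip().startswith("!"):
--             uplk_cmds += [slice(_start, idx + 1)]
--             _start = None
--     uplk_lines = [line for x in [commands[s] for s in uplk_cmds] for line in x]
--     idx_list = [x for idx in [list(range(s.start, s.stop)) for s in uplk_cmds] for x in idx]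
--     non_uplk_lines = [cmd for idx, cmd in enumerate(commands) if idx not in idx_list]
--     return uplk_lines, non_uplk_lines
-- ===== SOURCE B (Python) =====
-- def _extract_uplink_commands(commands: list[str]) -> tuple[list[str], list[str]]:
--     uplk_lines, non_uplk_lines = [], []
--     pending = None  # lines of the currently open "uplink wired" block, or None
--     for c in commands:
--         if c.lower().startswith("uplink wired"):
--             if pending is not None:
--                 non_uplk_lines.extend(pending)  # abandoned block stays non-uplink
--             pending = [c]
--         elif pending is not None:
--             pending.append(c)
--             if c.lstrip().startswith("!"):
--                 uplk_lines.extend(pending)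
--                 pending = None
--         else:
--             non_uplk_lines.append(c)
--     if pending is not None:  # unclosed block stays non-uplink
--         non_uplk_lines.extend(pending)
--     return uplk_lines, non_uplk_lines
-- ===== Notes on version B (the rewrite author's own statement) =====
-- stated objective: simpler
-- what changed: Replaced A's three-phase pipeline (collect slice objects, then rebuild lines and an index list via comprehensions and an O(n*k) 'idx not in idx_list' scan) with one single pass that carries the open block as a pending list and never touches indices.
-- intended difference: On inputs whose first line starts with 'uplink wired' and whose first following 'uplink wired'-or-'!' line is a '!', A returns that whole block in the non-uplink list (its truthiness test 'if _start' treats block start index 0 as falsy so the block never closes), while B returns it in the uplink list, which is the evident intent of the function. — e.g. on _extract_uplink_commands(["uplink wired 1", "!"]): A returns ([], ["uplink wired 1", "!"]), B returns (["uplink wired 1", "!"], [])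
import Mathlib
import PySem

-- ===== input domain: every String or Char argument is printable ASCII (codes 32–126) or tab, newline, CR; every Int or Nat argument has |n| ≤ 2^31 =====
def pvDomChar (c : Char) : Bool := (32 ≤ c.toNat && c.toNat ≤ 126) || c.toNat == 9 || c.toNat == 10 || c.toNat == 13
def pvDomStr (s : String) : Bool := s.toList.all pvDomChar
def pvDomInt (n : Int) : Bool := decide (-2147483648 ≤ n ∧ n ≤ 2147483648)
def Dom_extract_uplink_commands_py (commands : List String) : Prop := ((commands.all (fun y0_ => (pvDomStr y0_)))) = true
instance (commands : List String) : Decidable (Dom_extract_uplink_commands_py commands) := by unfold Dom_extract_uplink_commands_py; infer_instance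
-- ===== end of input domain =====

-- B replaces A's slice-collection + comprehension + 'idx not in idx_list' pipeline by one single pass
-- carrying the open "uplink wired" block as a pending list (objective: simpler); on inputs where A's
-- falsy '_start = 0' quirk drops the leading block, B classifies it as uplink (see D_ below).


-- shared line tests: c.lower().startswith("uplink wired") and c.lstrip().startswith("!")
def uplkLine (c : String) : Bool := PySem.Str.startswith (PySem.Str.lower c) "uplink wired"
def bangLine (c : String) : Bool := PySem.Str.startswith (PySem.Str.lstrip c) "!"

-- ===== PORT A =====
-- the for-loop of A: state _start (None or int), accumulator uplk_cmds of slice(start, stop) pairs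
def aLoop : List (Int × String) → Option Int → List (Int × Int) → List (Int × Int)
  | [], _, acc => acc
  | (idx, c) :: t, st, acc =>
    if uplkLine c then aLoop t (some idx) acc
    else
      match st with
      | some s =>
        if (s != 0) && bangLine c then aLoop t none (acc ++ [(s, idx + 1)])
        else aLoop t (some s) acc
      | none => aLoop t none acc

def extract_uplink_commands_py (commands : List String) : List String × List String :=
  let uplk_cmds := aLoop (PySem.List.enumerate commands 0) none []
  let uplk_lines := (uplk_cmds.map (fun s => PySem.List.slice commands (some s.1) (some s.2))).flatten
  let idx_list := (uplk_cmds.map (fun s => PySem.List.pyRange s.1 s.2 1)).flatten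
  let non_uplk_lines := ((PySem.List.enumerate commands 0).filter (fun p => !(idx_list.contains p.1))).map (·.2)
  (uplk_lines, non_uplk_lines)

-- ===== PORT B =====
-- single pass: pending = lines of the currently open block (or none), u/n = output accumulators
def bLoop : List String → Option (List String) → List String → List String → List String × List String
  | [], pending, u, n =>
    match pending with
    | some p => (u, n ++ p)
    | none => (u, n)
  | c :: t, pending, u, n =>
    if uplkLine c then
      match pending with
      | some p => bLoop t (some [c]) u (n ++ p)
      | none => bLoop t (some [c]) u n
    else
      match pending with
      | some p =>
        if bangLine c then bLoop t none (u ++ (p ++ [c])) n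
        else bLoop t (some (p ++ [c])) u n
      | none => bLoop t none u (n ++ [c])

def extract_uplink_commands_py_alt (commands : List String) : List String × List String :=
  bLoop commands none [] []

-- ===== PRECONDITION & SPEC =====
-- On inputs whose first line starts with "uplink wired" and whose first later "uplink wired"-or-"!"
-- line is a "!", A leaves that whole block in the non-uplink list (its 'if _start' truthiness test
-- treats start index 0 as falsy, so the block never closes), while B puts it in the uplink list,
-- which is the evident intent of the function.
def D_extract_uplink_commands_py (commands : List String) : Prop :=
  (commands.head?.elim false uplkLine) = true ∧
  ((commands.tail.find? (fun x => uplkLine x || bangLine x)).elim false (fun x => bangLine x && !uplkLine x)) = true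

instance (commands : List String) : Decidable (D_extract_uplink_commands_py commands) := by
  unfold D_extract_uplink_commands_py; infer_instance

def Spec_extract_uplink_commands_py (commands : List String) (out : List String × List String) : Prop :=
  ¬ D_extract_uplink_commands_py commands → out = extract_uplink_commands_py_alt commands

instance (commands : List String) (out : List String × List String) : Decidable (Spec_extract_uplink_commands_py commands out) := by
  unfold Spec_extract_uplink_commands_py; infer_instance

def pvDiffWitness_extract_uplink_commands_py : List String := ["uplink wired 1", "!"]

def pvDiffWitnessOut_extract_uplink_commands_py : (List String × List String) × (List String × List String) :=
  (([], ["uplink wired 1", "!"]), (["uplink wired 1", "!"], []))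

-- ===== CLAIM (what is proved, stated in full; the proofs are below) =====
def Claim_unchanged_extract_uplink_commands_py : Prop := ∀ (commands : List String), Dom_extract_uplink_commands_py commands → Spec_extract_uplink_commands_py commands (extract_uplink_commands_py commands)
def Claim_changed_extract_uplink_commands_py : Prop := Dom_extract_uplink_commands_py (pvDiffWitness_extract_uplink_commands_py) ∧ D_extract_uplink_commands_py (pvDiffWitness_extract_uplink_commands_py) ∧ extract_uplink_commands_py (pvDiffWitness_extract_uplink_commands_py) = pvDiffWitnessOut_extract_uplink_commands_py.1 ∧ extract_uplink_commands_py_alt (pvDiffWitness_extract_uplink_commands_py) = pvDiffWitnessOut_extract_uplink_commands_py.2 ∧ pvDiffWitnessOut_extract_uplink_commands_py.1 ≠ pvDiffWitnessOut_extract_uplink_commands_py.2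
def Claim_exact_extract_uplink_commands_py : Prop := ∀ (commands : List String), Dom_extract_uplink_commands_py commands → D_extract_uplink_commands_py commands → extract_uplink_commands_py commands ≠ extract_uplink_commands_py_alt commands

-- ===== LEMMAS AND PROOFS =====

-- common recursive description of the partition: specR = closed-state, openB p = inside a block with
-- pending lines p (abandoned/unclosed blocks fall back to the non-uplink side)
mutual
def specR : List String → List String × List String
  | [] => ([], [])
  | c :: t =>
    if uplkLine c then openB [c] t
    else ((specR t).1, c :: (specR t).2)
termination_by l => l.length
def openB : List String → List String → List String × List String
  | p, [] => ([], p)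
  | p, c :: t =>
    if uplkLine c then ((openB [c] t).1, p ++ (openB [c] t).2)
    else if bangLine c then (p ++ [c] ++ (specR t).1, (specR t).2)
    else openB (p ++ [c]) t
termination_by _ l => l.length
end

-- no "!" line before the first "uplink wired" line
def nbu : List String → Bool
  | [] => true
  | c :: t => if uplkLine c then true else (!bangLine c) && nbu t

theorem bLoop_eq (t : List String) : ∀ (u n : List String),
    (bLoop t none u n = (u ++ (specR t).1, n ++ (specR t).2)) ∧
    ∀ p, bLoop t (some p) u n = (u ++ (openB p t).1, n ++ (openB p t).2) := by
  induction t with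
  | nil => intro u n; simp [bLoop, specR, openB]
  | cons c t ih =>
    intro u n
    constructor
    · by_cases hu : uplkLine c
      · simp only [bLoop, specR, hu, if_pos]
        rw [((ih u n).2) [c]]
      · simp only [bLoop, specR, hu, reduceIte, Bool.false_eq_true]
        rw [(ih u (n ++ [c])).1]; simp
    · intro p
      by_cases hu : uplkLine c
      · simp only [bLoop, openB, hu, reduceIte]
        rw [((ih u (n ++ p)).2) [c]]; simp
      · by_cases hb : bangLine c
        · simp only [bLoop, openB, hu, hb, reduceIte, Bool.false_eq_true]
          rw [(ih (u ++ (p ++ [c])) n).1]; simp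
        · simp only [bLoop, openB, hu, hb, reduceIte, Bool.false_eq_true]
          rw [((ih u n).2) (p ++ [c])]

def idxsOf (A : List (Int × Int)) : List Int := (A.map (fun s => PySem.List.pyRange s.1 s.2 1)).flatten

def FF (commands : List String) (i : Nat) (st : Option Int) : List (Int × Int) :=
  aLoop (PySem.List.enumerate (commands.drop i) (i : Int)) st []

def outSl (commands : List String) (A : List (Int × Int)) : List String :=
  (A.map (fun s => PySem.List.slice commands (some s.1) (some s.2))).flatten

def nonF (commands : List String) (m : Nat) (A : List (Int × Int)) : List String :=
  ((PySem.List.enumerate (commands.drop m) (m : Int)).filter (fun p => !((idxsOf A).contains p.1))).map (·.2)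

def headOK (commands : List String) : Prop :=
  ∀ c t', commands = c :: t' → uplkLine c = true → nbu t' = true

theorem aLoop_acc (l : List (Int × String)) : ∀ (st : Option Int) (acc : List (Int × Int)),
    aLoop l st acc = acc ++ aLoop l st [] := by
  induction l with
  | nil => intro st acc; simp [aLoop]
  | cons x t ih =>
    intro st acc
    obtain ⟨idx, c⟩ := x
    by_cases hu : uplkLine c
    · simp only [aLoop, hu, reduceIte]; exact ih _ _
    · cases st with
      | none => simp only [aLoop, hu, Bool.false_eq_true, reduceIte]; exact ih _ _
      | some s =>
        by_cases hc : ((s != 0) && bangLine c) = true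
        · simp only [aLoop, hu, Bool.false_eq_true, reduceIte, hc]
          rw [ih none (acc ++ [(s, idx + 1)]), ih none ([] ++ [(s, idx + 1)])]
          simp
        · simp only [aLoop, hu, Bool.false_eq_true, reduceIte, hc]
          exact ih _ _

def stLow : Option Int → Int → Int
  | none, i => i
  | some s, i => min s i

theorem aLoop_lb (l : List String) : ∀ (i : Int) (st : Option Int),
    ∀ q ∈ aLoop (PySem.List.enumerate l i) st [], stLow st i ≤ q.1 := by
  induction l with
  | nil => intro i st q hq; simp [PySem.List.enumerate_nil, aLoop] at hq
  | cons c t ih =>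
    intro i st q hq
    rw [PySem.List.enumerate_cons] at hq
    have hlow : stLow st i ≤ i := by cases st <;> simp [stLow]
    by_cases hu : uplkLine c
    · simp only [aLoop, hu, reduceIte] at hq
      have := ih (i + 1) (some i) q hq
      simp [stLow] at this
      omega
    · cases st with
      | none =>
        simp only [aLoop, hu, Bool.false_eq_true, reduceIte] at hq
        have := ih (i + 1) none q hq
        simp [stLow] at this ⊢
        omega
      | some s =>
        by_cases hc : ((s != 0) && bangLine c) = true
        · simp only [aLoop, hu, Bool.false_eq_true, reduceIte, hc] at hq
          rw [aLoop_acc] at hq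
          simp only [List.nil_append, List.cons_append, List.mem_cons] at hq
          rcases hq with rfl | hq
          · simp [stLow]
          · have := ih (i + 1) none q hq
            simp [stLow] at this ⊢
            omega
        · simp only [aLoop, hu, Bool.false_eq_true, reduceIte, hc] at hq
          have := ih (i + 1) (some s) q hq
          simp [stLow] at this ⊢
          omega

theorem contains_idxsOf_eq_false (A : List (Int × Int)) (j : Int)
    (h : ∀ q ∈ A, j < q.1) : (idxsOf A).contains j = false := by
  have hnm : j ∉ idxsOf A := by
    intro hm
    simp only [idxsOf, List.mem_flatten, List.mem_map] at hm
    obtain ⟨_, ⟨q, hq, rfl⟩, hj⟩ := hm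
    rw [PySem.List.mem_pyRange_one] at hj
    exact absurd (h q hq) (by omega)
  exact Bool.eq_false_iff.mpr (by simpa using hnm)

theorem idxsOf_cons (a b : Int) (A : List (Int × Int)) :
    idxsOf ((a, b) :: A) = PySem.List.pyRange a b 1 ++ idxsOf A := by simp [idxsOf]

theorem outSl_cons (commands : List String) (a b : Int) (A : List (Int × Int)) :
    outSl commands ((a, b) :: A) = PySem.List.slice commands (some a) (some b) ++ outSl commands A := by
  simp [outSl]

theorem drop_decomp (commands : List String) (s i : Nat) (hsi : s ≤ i) :
    commands.drop s = (commands.drop s).take (i - s) ++ commands.drop i := by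
  conv_lhs => rw [← List.take_append_drop (i - s) (commands.drop s)]
  have h : s + (i - s) = i := by omega
  rw [List.drop_drop, h]

theorem take_len (commands : List String) (s i : Nat) (hsi : s ≤ i) (hi : i ≤ commands.length) :
    ((commands.drop s).take (i - s)).length = i - s := by
  simp [List.length_take, List.length_drop]
  omega

theorem nonF_flush (commands : List String) (s i : Nat) (hsi : s ≤ i) (hi : i ≤ commands.length)
    (A : List (Int × Int)) (h : ∀ j : Int, (s : Int) ≤ j → j < (i : Int) → (idxsOf A).contains j = false) :
    nonF commands s A = (commands.drop s).take (i - s) ++ nonF commands i A := by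
  unfold nonF
  conv_lhs => rw [drop_decomp commands s i hsi]
  rw [PySem.List.enumerate_append, take_len commands s i hsi hi]
  have hoff : (s : Int) + ((i - s : Nat) : Int) = (i : Int) := by push_cast; omega
  rw [hoff, List.filter_append, List.map_append]
  congr 1
  rw [List.filter_eq_self.mpr, PySem.List.map_snd_enumerate]
  intro x hx
  obtain ⟨k, hk, rfl⟩ := (PySem.List.mem_enumerate_iff _ _ _).mp hx
  rw [take_len commands s i hsi hi] at hk
  simp only [Bool.not_eq_eq_eq_not, Bool.not_true]
  exact h _ (by omega) (by push_cast; omega)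

theorem nonF_cons_keep (commands : List String) (i : Nat) (c : String) (t' : List String)
    (hdrop : commands.drop i = c :: t') (A : List (Int × Int))
    (hc : (idxsOf A).contains (i : Int) = false) :
    nonF commands i A = c :: nonF commands (i + 1) A := by
  have hdrop' : commands.drop (i + 1) = t' := by rw [← List.tail_drop, hdrop]; rfl
  unfold nonF
  rw [hdrop, hdrop', PySem.List.enumerate_cons]
  have : ((i + 1 : Nat) : Int) = (i : Int) + 1 := by push_cast; ring
  rw [this, List.filter_cons_of_pos (by simpa using hc), List.map_cons]

theorem nonF_close (commands : List String) (s i : Nat) (hsi : s ≤ i) (hi : i < commands.length)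
    (A : List (Int × Int)) :
    nonF commands s (((s : Int), (i : Int) + 1) :: A) = nonF commands (i + 1) A := by
  unfold nonF
  conv_lhs => rw [drop_decomp commands s (i + 1) (by omega)]
  rw [PySem.List.enumerate_append, take_len commands s (i + 1) (by omega) (by omega)]
  have hoff : (s : Int) + ((i + 1 - s : Nat) : Int) = ((i + 1 : Nat) : Int) := by push_cast; omega
  rw [hoff, List.filter_append, List.map_append]
  have h1 : (PySem.List.enumerate ((commands.drop s).take (i + 1 - s)) (s : Int)).filter
      (fun p => !((idxsOf (((s : Int), (i : Int) + 1) :: A)).contains p.1)) = [] := by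
    rw [List.filter_eq_nil_iff]
    intro x hx
    obtain ⟨k, hk, rfl⟩ := (PySem.List.mem_enumerate_iff _ _ _).mp hx
    rw [take_len commands s (i + 1) (by omega) (by omega)] at hk
    have hmem : ((s : Int) + (k : Int)) ∈ idxsOf (((s : Int), (i : Int) + 1) :: A) := by
      rw [idxsOf_cons, List.mem_append]
      exact Or.inl (PySem.List.mem_pyRange_one.mpr (by push_cast; omega))
    simp [hmem]
  have h2 : (PySem.List.enumerate (commands.drop (i + 1)) ((i + 1 : Nat) : Int)).filter
      (fun p => !((idxsOf (((s : Int), (i : Int) + 1) :: A)).contains p.1)) =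
      (PySem.List.enumerate (commands.drop (i + 1)) ((i + 1 : Nat) : Int)).filter
      (fun p => !((idxsOf A).contains p.1)) := by
    apply List.filter_congr
    intro x hx
    obtain ⟨k, hk, rfl⟩ := (PySem.List.mem_enumerate_iff _ _ _).mp hx
    have hnm : (((i + 1 : Nat) : Int) + (k : Int)) ∉ PySem.List.pyRange (s : Int) ((i : Int) + 1) 1 := by
      rw [PySem.List.mem_pyRange_one]; push_cast; omega
    rw [idxsOf_cons]
    simp only [List.contains_append]
    have hcf : (PySem.List.pyRange (s : Int) ((i : Int) + 1) 1).contains (((i + 1 : Nat) : Int) + (k : Int)) = false := by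
      simpa using hnm
    rw [hcf, Bool.false_or]
  rw [h1, h2]
  simp

theorem FF_step (commands : List String) (i : Nat) (c : String) (t' : List String)
    (hdrop : commands.drop i = c :: t') (st : Option Int) :
    FF commands i st = aLoop (((i : Int), c) :: PySem.List.enumerate (commands.drop (i + 1)) (((i + 1 : Nat)) : Int)) st [] := by
  have hdrop' : commands.drop (i + 1) = t' := by rw [← List.tail_drop, hdrop]; rfl
  unfold FF
  rw [hdrop, hdrop', PySem.List.enumerate_cons]
  have h : ((i + 1 : Nat) : Int) = (i : Int) + 1 := by push_cast; ring
  rw [h]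

theorem main (commands : List String) : ∀ (t : List String) (i : Nat),
    commands.drop i = t →
    ((i = 0 → headOK commands) →
      (outSl commands (FF commands i none), nonF commands i (FF commands i none)) = specR t)
    ∧ (∀ s : Nat, s ≤ i → 1 ≤ i → (s = 0 → nbu t = true) →
      (outSl commands (FF commands i (some (s : Int))), nonF commands s (FF commands i (some (s : Int))))
        = openB (PySem.List.slice commands (some (s : Int)) (some (i : Int))) t) := by
  intro t
  induction t with
  | nil =>
    intro i hdrop
    have hFF : ∀ st, FF commands i st = [] := by
      intro st; unfold FF; rw [hdrop]; simp [PySem.List.enumerate_nil, aLoop]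
    have hlen : commands.length ≤ i := List.drop_eq_nil_iff.mp hdrop
    constructor
    · intro _
      rw [hFF]
      simp [outSl, specR, nonF, idxsOf, hdrop, PySem.List.enumerate_nil]
    · intro s hsi hi1 _
      rw [hFF]
      have hdsl : PySem.List.slice commands (some (s : Int)) (some (i : Int)) = commands.drop s := by
        rw [PySem.List.slice_natCast]
        exact List.take_of_length_le (by simp [List.length_drop]; omega)
      simp only [outSl, List.map_nil, List.flatten_nil, openB, hdsl]
      unfold nonF
      simp [idxsOf, PySem.List.map_snd_enumerate]
  | cons c t' ih =>
    intro i hdrop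
    have hil : i < commands.length := by
      by_contra hle
      push_neg at hle
      rw [List.drop_eq_nil_of_le hle] at hdrop
      exact absurd hdrop (by simp)
    have hdrop' : commands.drop (i + 1) = t' := by rw [← List.tail_drop, hdrop]; rfl
    have hc1 : ((i + 1 : Nat) : Int) = (i : Int) + 1 := by push_cast; ring
    have hsl1 : PySem.List.slice commands (some (i : Int)) (some ((i : Int) + 1)) = [c] := by
      rw [← hc1, PySem.List.slice_natCast, hdrop]
      simp
    have hslext : ∀ s : Nat, s ≤ i →
        PySem.List.slice commands (some (s : Int)) (some ((i : Int) + 1))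
          = PySem.List.slice commands (some (s : Int)) (some (i : Int)) ++ [c] := by
      intro s hsi
      rw [← hc1, PySem.List.slice_natCast, PySem.List.slice_natCast]
      conv_lhs => rw [drop_decomp commands s i hsi]
      rw [List.take_append]
      have hp : ((commands.drop s).take (i - s)).length = i - s := take_len commands s i hsi (le_of_lt hil)
      rw [List.take_of_length_le (by rw [hp]; omega), hp]
      rw [show i + 1 - s - (i - s) = 1 from by omega, hdrop]
      simp
    by_cases hu : uplkLine c = true
    · -- "uplink wired" line: open a new block at index i
      have hFF : ∀ st, FF commands i st = FF commands (i + 1) (some (i : Int)) := by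
        intro st
        rw [FF_step commands i c t' hdrop st]
        cases st with
        | none => simp only [aLoop, hu, reduceIte]; rfl
        | some s => simp only [aLoop, hu, reduceIte]; rfl
      have hopen : specR (c :: t') = openB [c] t' := by simp [specR, hu]
      constructor
      · intro hz
        have hnbu' : i = 0 → nbu t' = true := by
          intro h0
          have hc0 : commands = c :: t' := by rw [← hdrop, h0]; rfl
          exact hz h0 c t' hc0 hu
        have hIH := (ih (i + 1) hdrop').2 i (by omega) (by omega) hnbu'
        rw [hc1, hsl1] at hIH
        rw [hFF none, hopen]
        exact hIH
      · intro s hsi hi1 _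
        have hIH := (ih (i + 1) hdrop').2 i (by omega) (by omega) (fun h0 => absurd h0 (by omega))
        rw [hc1, hsl1] at hIH
        have hflush : nonF commands s (FF commands (i + 1) (some (i : Int)))
            = (commands.drop s).take (i - s) ++ nonF commands i (FF commands (i + 1) (some (i : Int))) := by
          apply nonF_flush commands s i hsi (le_of_lt hil)
          intro j hj1 hj2
          apply contains_idxsOf_eq_false
          intro q hq
          have := aLoop_lb (commands.drop (i + 1)) ((i + 1 : Nat) : Int) (some (i : Int)) q hq
          simp [stLow] at this
          omega
        have hRHS : openB (PySem.List.slice commands (some (s : Int)) (some (i : Int))) (c :: t')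
            = ((openB [c] t').1, PySem.List.slice commands (some (s : Int)) (some (i : Int)) ++ (openB [c] t').2) := by
          simp [openB, hu]
        rw [hFF (some (s : Int)), hRHS, ← hIH, hflush, PySem.List.slice_natCast]
    · -- not an "uplink wired" line
      constructor
      · intro hz
        have hFF : FF commands i none = FF commands (i + 1) none := by
          rw [FF_step commands i c t' hdrop none]
          simp only [aLoop, hu, Bool.false_eq_true, reduceIte]; rfl
        have hkeep : nonF commands i (FF commands (i + 1) none)
            = c :: nonF commands (i + 1) (FF commands (i + 1) none) := by
          apply nonF_cons_keep commands i c t' hdrop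
          apply contains_idxsOf_eq_false
          intro q hq
          have := aLoop_lb (commands.drop (i + 1)) ((i + 1 : Nat) : Int) none q hq
          simp [stLow] at this
          omega
        have hIH := (ih (i + 1) hdrop').1 (fun h0 => absurd h0 (by omega))
        have hspec : specR (c :: t') = ((specR t').1, c :: (specR t').2) := by simp [specR, hu]
        rw [hFF, hkeep, hspec, ← hIH]
      · intro s hsi hi1 hnbu
        by_cases hb : bangLine c = true
        · by_cases hs0 : s = 0
          · exfalso
            have := hnbu hs0
            simp [nbu, hu, hb] at this
          · -- a "!" line closes the block opened at s (s ≠ 0, so A's truthy test fires)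
            have hFF : FF commands i (some (s : Int))
                = ((s : Int), (i : Int) + 1) :: FF commands (i + 1) none := by
              rw [FF_step commands i c t' hdrop (some (s : Int))]
              have hcond : ((((s : Int)) != 0) && bangLine c) = true := by simp [hb, hs0]
              simp only [aLoop, hu, Bool.false_eq_true, reduceIte, hcond]
              rw [aLoop_acc]
              rfl
            have hIH := (ih (i + 1) hdrop').1 (fun h0 => absurd h0 (by omega))
            have hclose : nonF commands s (((s : Int), (i : Int) + 1) :: FF commands (i + 1) none)
                = nonF commands (i + 1) (FF commands (i + 1) none) := nonF_close commands s i hsi hil _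
            have hRHS : openB (PySem.List.slice commands (some (s : Int)) (some (i : Int))) (c :: t')
                = (PySem.List.slice commands (some (s : Int)) (some (i : Int)) ++ [c] ++ (specR t').1, (specR t').2) := by
              simp [openB, hu, hb]
            rw [hFF, outSl_cons, hclose, hslext s hsi, hRHS, ← hIH]
        · -- ordinary line inside the open block
          have hbf : bangLine c = false := by simpa using hb
          have hFF : FF commands i (some (s : Int)) = FF commands (i + 1) (some (s : Int)) := by
            rw [FF_step commands i c t' hdrop (some (s : Int))]
            simp only [aLoop, hu, hbf, Bool.false_eq_true, Bool.and_false, reduceIte]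
            rfl
          have hnbu' : s = 0 → nbu t' = true := by
            intro h0
            have := hnbu h0
            simp [nbu, hu] at this
            exact this.2
          have hIH := (ih (i + 1) hdrop').2 s (by omega) (by omega) hnbu'
          rw [hc1] at hIH
          have hRHS : openB (PySem.List.slice commands (some (s : Int)) (some (i : Int))) (c :: t')
              = openB (PySem.List.slice commands (some (s : Int)) (some (i : Int)) ++ [c]) t' := by
            simp [openB, hu, hbf]
          rw [hFF, hRHS, ← hslext s hsi, hIH]

theorem aLoop_zero (l : List (Int × String)) : ∀ (acc : List (Int × Int)),
    aLoop l (some 0) acc = aLoop l none acc := by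
  induction l with
  | nil => intro acc; rfl
  | cons x t ih =>
    intro acc
    obtain ⟨idx, c⟩ := x
    by_cases hu : uplkLine c = true
    · simp only [aLoop, hu, reduceIte]
    · simp only [aLoop, hu, Bool.false_eq_true, reduceIte, bne_self_eq_false, Bool.false_and]
      exact ih acc

theorem specR_prefix (t1 : List String) (r : List String)
    (h : ∀ y ∈ t1, uplkLine y = false ∧ bangLine y = false) :
    specR (t1 ++ r) = ((specR r).1, t1 ++ (specR r).2) := by
  induction t1 with
  | nil => simp
  | cons y t ih =>
    have hy := h y (List.mem_cons_self ..)
    rw [List.cons_append]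
    simp [specR, hy.1, ih (fun z hz => h z (List.mem_cons_of_mem _ hz))]

theorem openB_prefix (t1 : List String) : ∀ (p : List String) (x : String) (t2 : List String),
    (∀ y ∈ t1, uplkLine y = false ∧ bangLine y = false) → uplkLine x = false → bangLine x = true →
    openB p (t1 ++ x :: t2) = (p ++ t1 ++ [x] ++ (specR t2).1, (specR t2).2) := by
  induction t1 with
  | nil => intro p x t2 _ hux hbx; simp [openB, hux, hbx]
  | cons y t ih =>
    intro p x t2 h hux hbx
    have hy := h y (List.mem_cons_self ..)
    rw [List.cons_append]
    rw [show openB p (y :: (t ++ x :: t2)) = openB (p ++ [y]) (t ++ x :: t2) from by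
      simp [openB, hy.1, hy.2]]
    rw [ih (p ++ [y]) x t2 (fun z hz => h z (List.mem_cons_of_mem _ hz)) hux hbx]
    simp

theorem A_on_falsy_block (c0 : String) (tail : List String) (hu : uplkLine c0 = true) :
    extract_uplink_commands_py (c0 :: tail) = ((specR tail).1, c0 :: (specR tail).2) := by
  have hdrop0 : (c0 :: tail).drop 0 = c0 :: tail := rfl
  have hdrop1 : (c0 :: tail).drop 1 = tail := rfl
  have hFF0 : FF (c0 :: tail) 0 none = FF (c0 :: tail) 1 none := by
    rw [FF_step (c0 :: tail) 0 c0 tail hdrop0 none]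
    simp only [aLoop, hu, reduceIte, Nat.cast_zero, Nat.cast_one]
    rw [aLoop_zero]
    unfold FF
    simp
  have hmain := (main (c0 :: tail) tail 1 hdrop1).1 (fun h0 => absurd h0 (by omega))
  have hkeep : nonF (c0 :: tail) 0 (FF (c0 :: tail) 1 none)
      = c0 :: nonF (c0 :: tail) 1 (FF (c0 :: tail) 1 none) := by
    apply nonF_cons_keep (c0 :: tail) 0 c0 tail hdrop0
    apply contains_idxsOf_eq_false
    intro q hq
    have := aLoop_lb ((c0 :: tail).drop 1) ((1 : Nat) : Int) none q hq
    simp [stLow] at this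
    omega
  have hport : extract_uplink_commands_py (c0 :: tail)
      = (outSl (c0 :: tail) (FF (c0 :: tail) 0 none), nonF (c0 :: tail) 0 (FF (c0 :: tail) 0 none)) := rfl
  rw [hport, hFF0, hkeep, ← hmain]

-- ===== VERDICT (by name: the statement is the Claim_ definition above) =====
theorem nbu_of_find (t : List String)
    (h : ((t.find? (fun x => uplkLine x || bangLine x)).elim false (fun x => bangLine x && !uplkLine x)) = false) :
    nbu t = true := by
  induction t with
  | nil => rfl
  | cons c t ih =>
    by_cases hp : (uplkLine c || bangLine c) = true
    · rw [List.find?_cons_of_pos (p := fun x => uplkLine x || bangLine x) (show (fun x => uplkLine x || bangLine x) c = true from hp)] at h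
      simp only [Option.elim, Bool.and_eq_false_iff, Bool.not_eq_false] at h
      have hup : uplkLine c = true := by
        rcases h with h' | h'
        · rcases Bool.or_eq_true_iff.mp hp with h'' | h''
          · exact h''
          · rw [h''] at h'; cases h'
        · simpa using h'
      simp [nbu, hup]
    · rw [List.find?_cons_of_neg (p := fun x => uplkLine x || bangLine x) (show ¬(fun x => uplkLine x || bangLine x) c = true from hp)] at h
      simp only [Bool.or_eq_true_iff, not_or, Bool.not_eq_true] at hp
      simp [nbu, hp.1, hp.2, ih h]

theorem alt_eq_specR (commands : List String) : extract_uplink_commands_py_alt commands = specR commands := by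
  unfold extract_uplink_commands_py_alt
  rw [(bLoop_eq commands [] []).1]
  simp

theorem extract_uplink_commands_py_spec : Claim_unchanged_extract_uplink_commands_py := by
  intro commands _ hnd
  have hA : extract_uplink_commands_py commands
      = (outSl commands (FF commands 0 none), nonF commands 0 (FF commands 0 none)) := rfl
  have hOK : (0 : Nat) = 0 → headOK commands := by
    intro _
    intro ch th hheq hup
    apply nbu_of_find
    by_contra hne
    have hel : ((th.find? (fun x => uplkLine x || bangLine x)).elim false (fun x => bangLine x && !uplkLine x)) = true := by
      cases hx : ((th.find? (fun x => uplkLine x || bangLine x)).elim false (fun x => bangLine x && !uplkLine x)) with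
      | true => rfl
      | false => exact absurd hx hne
    exact hnd ⟨by simp [hheq, hup], by simpa [hheq] using hel⟩
  have h1 := (main commands commands 0 (by simp)).1 hOK
  rw [hA, h1, alt_eq_specR]

theorem extract_uplink_commands_py_changed : Claim_changed_extract_uplink_commands_py := by
  unfold Claim_changed_extract_uplink_commands_py; decide

theorem extract_uplink_commands_py_tight : Claim_exact_extract_uplink_commands_py := by
  intro commands _ hD heq
  obtain ⟨h1, h2⟩ := hD
  cases commands with
  | nil => simp at h1
  | cons c0 tail =>
    simp only [List.head?_cons, Option.elim] at h1
    simp only [List.tail_cons] at h2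
    cases hf : tail.find? (fun x => uplkLine x || bangLine x) with
    | none => rw [hf] at h2; simp at h2
    | some x =>
      rw [hf] at h2
      simp only [Option.elim, Bool.and_eq_true, Bool.not_eq_eq_eq_not, Bool.not_true] at h2
      obtain ⟨hbx, hux⟩ := h2
      obtain ⟨hpx, t1, t2, rfl, hfree⟩ := List.find?_eq_some_iff_append.mp hf
      have hfree' : ∀ y ∈ t1, uplkLine y = false ∧ bangLine y = false := by
        intro y hy
        have := hfree y hy
        simp only [Bool.not_eq_true', Bool.or_eq_false_iff] at this
        exact this
      have hAv := A_on_falsy_block c0 (t1 ++ x :: t2) h1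
      have hBv : extract_uplink_commands_py_alt (c0 :: (t1 ++ x :: t2)) = openB [c0] (t1 ++ x :: t2) := by
        rw [alt_eq_specR]
        simp [specR, h1]
      rw [hAv, hBv, openB_prefix t1 [c0] x t2 hfree' hux hbx] at heq
      rw [specR_prefix t1 (x :: t2) hfree'] at heq
      have hx2 : specR (x :: t2) = ((specR t2).1, x :: (specR t2).2) := by
        simp [specR, hux]
      rw [hx2] at heq
      have := congrArg (fun pr => pr.2.length) heq
      simp at this
      omega
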